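-- pv_equiv track=rewrite | github.com/anon-legion/algorithms | path_finding/bfs.py | newCoordinate
-- ===== SOURCE A (Python) =====
-- def newCoordinate(fr, path):
--     x, y = fr
--     for move in path:
--         if move == "L":
--             x -= 1
--         elif move == "R":
--             x += 1
--         elif move == "U":
--             y -= 1
--         elif move == "D":
--                 y += 1
--     return (x, y)
-- ===== SOURCE B (Python) =====
-- def newCoordinate(fr, path):
--     path = list(path)
--     return (fr[0] + path.count("R") - path.count("L"),
--             fr[1] + path.count("D") - path.count("U"))
-- ===== Notes on version B (the rewrite author's own statement) =====
-- stated objective: idiomatic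
-- what changed: Replaces the sequential per-move branching loop with a tally-then-combine closed form: count each move letter once and compute both coordinates arithmetically.
import Mathlib
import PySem

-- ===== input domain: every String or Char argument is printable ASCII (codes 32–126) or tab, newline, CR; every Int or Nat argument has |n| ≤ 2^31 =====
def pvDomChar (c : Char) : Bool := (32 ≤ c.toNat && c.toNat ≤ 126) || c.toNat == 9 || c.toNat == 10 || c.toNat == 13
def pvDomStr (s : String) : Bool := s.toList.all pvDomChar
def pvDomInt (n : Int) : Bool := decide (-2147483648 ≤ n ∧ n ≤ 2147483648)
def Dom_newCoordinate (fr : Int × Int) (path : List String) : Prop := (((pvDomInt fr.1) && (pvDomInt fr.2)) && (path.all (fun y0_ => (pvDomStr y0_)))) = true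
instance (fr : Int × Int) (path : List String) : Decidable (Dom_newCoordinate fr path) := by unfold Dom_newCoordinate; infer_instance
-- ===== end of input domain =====

-- B replaces A's per-character branch loop with a tally of each move letter and a closed-form combine (idiomatic, same cost).


-- ===== PORT A =====
def newCoordinate (fr : Int × Int) (path : List String) : Int × Int :=
  path.foldl (fun xy move =>
    if move == "L" then (xy.1 - 1, xy.2)
    else if move == "R" then (xy.1 + 1, xy.2)
    else if move == "U" then (xy.1, xy.2 - 1)
    else if move == "D" then (xy.1, xy.2 + 1)
    else xy) fr

-- ===== PORT B =====
def newCoordinate_alt (fr : Int × Int) (path : List String) : Int × Int :=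
  (fr.1 + (PySem.List.count path "R" : Int) - (PySem.List.count path "L" : Int),
   fr.2 + (PySem.List.count path "D" : Int) - (PySem.List.count path "U" : Int))

-- ===== PRECONDITION & SPEC =====
def Spec_newCoordinate (fr : Int × Int) (path : List String) (out : Int × Int) : Prop := out = newCoordinate_alt fr path
instance (fr : Int × Int) (path : List String) (out : Int × Int) : Decidable (Spec_newCoordinate fr path out) := by unfold Spec_newCoordinate; infer_instance

-- ===== CLAIM (what is proved, stated in full; the proofs are below) =====
def Claim_equal_newCoordinate : Prop := ∀ (fr : Int × Int) (path : List String), Dom_newCoordinate fr path → Spec_newCoordinate fr path (newCoordinate fr path)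

-- ===== LEMMAS AND PROOFS =====

lemma newCoordinate_eq_alt (fr : Int × Int) (path : List String) :
    newCoordinate fr path = newCoordinate_alt fr path := by
  induction path generalizing fr with
  | nil => simp [newCoordinate, newCoordinate_alt, PySem.List.count]
  | cons h t ih =>
    simp only [newCoordinate, List.foldl_cons] at *
    rw [ih]
    simp only [newCoordinate_alt, PySem.List.count, List.count_cons]
    by_cases h1 : h = "L" <;> by_cases h2 : h = "R" <;> by_cases h3 : h = "U" <;>
      by_cases h4 : h = "D" <;> simp_all <;> ring_nf

-- ===== VERDICT (by name: the statement is the Claim_ definition above) =====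
theorem newCoordinate_spec : Claim_equal_newCoordinate := by
  intro fr path _
  unfold Spec_newCoordinate
  exact newCoordinate_eq_alt fr path
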